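-- pv_equiv track=rewrite | github.com/Dasperless/Proyectos-TEC | Taller de programación/Laboratorios/Lab4.py | lista_mayores
-- ===== SOURCE A (Python) =====
-- def lista_mayores(lista,piv):
--     if lista == []:
--         return []
--     else:
--         if lista[0]>piv:
--             return [lista[0]]+lista_mayores(lista[1:],piv)
--         else:
--             return lista_mayores(lista[1:],piv)
-- ===== SOURCE B (Python) =====
-- def lista_mayores(lista, piv):
--     res = []
--     for x in lista:
--         if x > piv:
--             res.append(x)
--     return res
-- ===== Notes on version B (the rewrite author's own statement) =====
-- stated objective: faster
-- what changed: Replaced the O(n^2) recursion (list slicing plus list concatenation per element) with a single iterative pass appending to an accumulator list.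
import Mathlib
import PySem

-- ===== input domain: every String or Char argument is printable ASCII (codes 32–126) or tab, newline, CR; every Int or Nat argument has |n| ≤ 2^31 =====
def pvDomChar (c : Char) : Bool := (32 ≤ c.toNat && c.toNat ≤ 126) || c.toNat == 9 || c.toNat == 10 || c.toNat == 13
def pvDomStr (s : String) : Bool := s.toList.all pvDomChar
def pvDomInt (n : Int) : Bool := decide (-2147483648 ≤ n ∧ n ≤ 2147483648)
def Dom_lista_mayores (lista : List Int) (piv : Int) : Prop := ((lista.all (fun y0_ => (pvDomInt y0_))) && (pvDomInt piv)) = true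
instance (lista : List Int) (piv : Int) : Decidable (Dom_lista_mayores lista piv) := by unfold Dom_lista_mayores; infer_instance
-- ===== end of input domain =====

-- B replaces A's recursion (slice + concatenation per element) with one iterative pass
-- appending to an accumulator; objective: faster (linear instead of quadratic).

-- ===== PORT A =====
-- literal transliteration of A's structural recursion
def lista_mayores (lista : List Int) (piv : Int) : List Int :=
  match lista with
  | [] => []
  | x :: rest =>
    if x > piv then
      [x] ++ lista_mayores rest piv
    else
      lista_mayores rest piv

-- ===== PORT B =====
-- B's for-loop over lista with accumulator res, appending when x > piv
def lista_mayores_alt (lista : List Int) (piv : Int) : List Int :=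
  lista.foldl (fun res x => if x > piv then res ++ [x] else res) []

-- ===== PRECONDITION & SPEC =====
def Spec_lista_mayores (lista : List Int) (piv : Int) (out : List Int) : Prop := out = lista_mayores_alt lista piv
instance (lista : List Int) (piv : Int) (out : List Int) : Decidable (Spec_lista_mayores lista piv out) := by unfold Spec_lista_mayores; infer_instance

-- ===== CLAIM (what is proved, stated in full; the proofs are below) =====
def Claim_equal_lista_mayores : Prop := ∀ (lista : List Int) (piv : Int), Dom_lista_mayores lista piv → Spec_lista_mayores lista piv (lista_mayores lista piv)

-- ===== LEMMAS AND PROOFS =====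

-- the foldl with accumulator acc produces acc ++ (A's recursive result)
theorem lista_mayores_foldl_acc (lista : List Int) (piv : Int) (acc : List Int) :
    lista.foldl (fun res x => if x > piv then res ++ [x] else res) acc
      = acc ++ lista_mayores lista piv := by
  induction lista generalizing acc with
  | nil => simp [lista_mayores]
  | cons x rest ih =>
    simp only [List.foldl, lista_mayores]
    by_cases h : x > piv <;> simp [h, ih, List.append_assoc]

-- ===== VERDICT (by name: the statement is the Claim_ definition above) =====
theorem lista_mayores_spec : Claim_equal_lista_mayores := by
  intro lista piv _
  unfold Spec_lista_mayores lista_mayores_alt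
  rw [lista_mayores_foldl_acc]
  simp
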